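-- pv_equiv track=rewrite | github.com/mltheuser/3Dcrafter | backend/adapters/minecraft_importer.py | all_multipart_subsets
-- ===== SOURCE A (Python) =====
-- def all_multipart_subsets(lst):
--     """
--     Returns all possible subsets of the given list.
--
--     Example:
--         >>> all_multipart_subsets([1, 2, 3])
--         [[], [1], [2], [1, 2], [3], [1, 3], [2, 3], [1, 2, 3]]
--     """
--     if not lst:
--         return [[]]  # base case: empty list has only one subset, the empty set
--
--     subsets = []
--     first_elem = lst[0]
--     rest_list = lst[1:]
--     for subset in all_multipart_subsets(rest_list):
--         subsets.append(subset)  # add the subset without the first element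
--         # only add the first element if no existing condition contradicts it
--         has_contradiction = False
--         for key in first_elem['when']:
--             for e in subset:
--                 if key in e['when'] and e['when'][key] != first_elem['when'][key]:
--                     has_contradiction = True
--                     break
--         # else you can add it
--         if not has_contradiction:
--             subsets.append([first_elem] + subset)  # add the subset with the first element
--
--     return subsets
-- ===== SOURCE B (Python) =====
-- def all_multipart_subsets(lst):
--     """Iterative subset builder: same subsets in the same order as the
--     recursive version, produced by folding over the list in reverse."""
--     result = [[]]
--     for element in reversed(lst):
--         w = element['when']
--         new_subsets = []
--         for subset in result:
--             new_subsets.append(subset)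
--             if not any(k in e['when'] and e['when'][k] != w[k]
--                        for k in w for e in subset):
--                 new_subsets.append([element] + subset)
--         result = new_subsets
--     return result
-- ===== Notes on version B (the rewrite author's own statement) =====
-- stated objective: alternative
-- what changed: Replaces the linear recursion (recurse on the tail, then extend each tail-subset) with an iterative accumulator that folds over the list in reverse, rebuilding the subset list in place; the contradiction test becomes a single any() expression instead of nested loops with a flag and break.
import Mathlib
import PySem

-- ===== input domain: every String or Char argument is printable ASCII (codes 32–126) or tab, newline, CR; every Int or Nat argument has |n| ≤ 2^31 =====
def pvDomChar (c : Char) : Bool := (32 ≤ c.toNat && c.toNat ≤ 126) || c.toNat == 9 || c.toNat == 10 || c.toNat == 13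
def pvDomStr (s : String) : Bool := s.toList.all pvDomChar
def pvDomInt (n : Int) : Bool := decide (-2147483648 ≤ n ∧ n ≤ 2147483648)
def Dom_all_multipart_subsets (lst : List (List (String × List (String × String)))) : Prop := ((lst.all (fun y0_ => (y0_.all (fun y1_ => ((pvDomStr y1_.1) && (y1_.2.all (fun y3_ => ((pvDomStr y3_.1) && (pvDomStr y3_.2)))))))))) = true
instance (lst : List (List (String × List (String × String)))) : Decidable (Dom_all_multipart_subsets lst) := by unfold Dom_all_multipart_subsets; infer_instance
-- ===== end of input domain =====

-- B replaces A's linear recursion with an iterative fold over the reversed list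
-- and an any-based contradiction test (alternative decomposition, same cost).


-- ===== PORT A =====
-- element['when'] (total form; Pre_ guarantees the key is present)
def pvWhen (el : List (String × List (String × String))) : List (String × String) :=
  PySem.Dict.getD (PySem.Dict.mk el) "when" []

-- A's inner 'for e in subset: … break' loop
def pvInnerA (key fval : String) : List (List (String × List (String × String))) → Bool
  | [] => false
  | e :: rest =>
    match PySem.Dict.get? (PySem.Dict.mk (pvWhen e)) key with
    | some v => if v ≠ fval then true else pvInnerA key fval rest
    | none => pvInnerA key fval rest

-- A's 'for key in first_elem['when']' loop maintaining has_contradiction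
def pvContraA (w : List (String × String))
    (subset : List (List (String × List (String × String)))) : Bool :=
  (PySem.Dict.keys (PySem.Dict.mk w)).foldl
    (fun hc key =>
      if pvInnerA key (PySem.Dict.getD (PySem.Dict.mk w) key "") subset then true else hc)
    false

def all_multipart_subsets (lst : List (List (String × List (String × String)))) : List (List (List (String × List (String × String)))) :=
  match lst with
  | [] => [[]]
  | first :: rest =>
    (all_multipart_subsets rest).foldl
      (fun subsets subset =>
        let subsets := subsets ++ [subset]
        if pvContraA (pvWhen first) subset then subsets
        else subsets ++ [first :: subset])
      []

-- ===== PORT B =====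
-- B's any-based contradiction test
def pvContraB (w : List (String × String))
    (subset : List (List (String × List (String × String)))) : Bool :=
  (PySem.Dict.keys (PySem.Dict.mk w)).any (fun k =>
    subset.any (fun e =>
      match PySem.Dict.get? (PySem.Dict.mk (pvWhen e)) k with
      | some v => v ≠ PySem.Dict.getD (PySem.Dict.mk w) k ""
      | none => false))

-- one pass of B's outer loop (body of 'for element in reversed(lst)')
def pvStep (result : List (List (List (String × List (String × String)))))
    (elem : List (String × List (String × String))) : List (List (List (String × List (String × String)))) :=
  result.foldl
    (fun acc s =>
      let acc := acc ++ [s]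
      if pvContraB (pvWhen elem) s then acc else acc ++ [elem :: s])
    []

def all_multipart_subsets_alt (lst : List (List (String × List (String × String)))) : List (List (List (String × List (String × String)))) :=
  lst.reverse.foldl pvStep [[]]

-- ===== PRECONDITION & SPEC =====
-- Pre_ excludes exactly the inputs where Python raises KeyError: an element without a 'when' key.
def Pre_all_multipart_subsets (lst : List (List (String × List (String × String)))) : Prop :=
  ∀ el ∈ lst, (PySem.Dict.mk el).contains "when" = true
instance (lst : List (List (String × List (String × String)))) : Decidable (Pre_all_multipart_subsets lst) := by unfold Pre_all_multipart_subsets; infer_instance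
def pvWitness_all_multipart_subsets : (List (List (String × List (String × String)))) :=
  [[("when", [("north", "true")])], [("when", [("north", "false")])]]

def Spec_all_multipart_subsets (lst : List (List (String × List (String × String)))) (out : List (List (List (String × List (String × String))))) : Prop := out = all_multipart_subsets_alt lst
instance (lst : List (List (String × List (String × String)))) (out : List (List (List (String × List (String × String))))) : Decidable (Spec_all_multipart_subsets lst out) := by unfold Spec_all_multipart_subsets; infer_instance

-- ===== CLAIM (what is proved, stated in full; the proofs are below) =====
def Claim_equal_all_multipart_subsets : Prop := ∀ (lst : List (List (String × List (String × String)))), Dom_all_multipart_subsets lst → Pre_all_multipart_subsets lst → Spec_all_multipart_subsets lst (all_multipart_subsets lst)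

-- ===== LEMMAS AND PROOFS =====
-- A's inner break-loop equals B's any over the subset
theorem pvInnerA_eq_any (key fval : String)
    (s : List (List (String × List (String × String)))) :
    pvInnerA key fval s = s.any (fun e =>
      match PySem.Dict.get? (PySem.Dict.mk (pvWhen e)) key with
      | some v => decide (v ≠ fval)
      | none => false) := by
  induction s with
  | nil => rfl
  | cons e rest ih =>
    simp only [pvInnerA, List.any_cons]
    cases h : PySem.Dict.get? (PySem.Dict.mk (pvWhen e)) key with
    | none => simp [ih]
    | some v =>
      by_cases hv : v = fval
      · simp [hv, ih]
      · simp [hv]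

-- A's flag-and-break contradiction check equals B's any-based one
theorem pvContra_eq (w : List (String × String))
    (s : List (List (String × List (String × String)))) :
    pvContraA w s = pvContraB w s := by
  unfold pvContraA pvContraB
  rw [PySem.List.foldl_if_true_eq]
  simp [pvInnerA_eq_any]

theorem alt_cons (x : List (String × List (String × String)))
    (r : List (List (String × List (String × String)))) :
    all_multipart_subsets_alt (x :: r) = pvStep (all_multipart_subsets_alt r) x := by
  simp [all_multipart_subsets_alt, List.foldl_append]

theorem A_cons (x : List (String × List (String × String)))
    (r : List (List (String × List (String × String)))) :
    all_multipart_subsets (x :: r) = pvStep (all_multipart_subsets r) x := by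
  conv_lhs => rw [all_multipart_subsets.eq_def]
  unfold pvStep
  simp only [pvContra_eq]

theorem ports_eq (lst : List (List (String × List (String × String)))) :
    all_multipart_subsets lst = all_multipart_subsets_alt lst := by
  induction lst with
  | nil => rfl
  | cons x r ih =>
    rw [alt_cons, ← ih]
    exact A_cons x r

-- ===== VERDICT (by name: the statement is the Claim_ definition above) =====
theorem all_multipart_subsets_spec : Claim_equal_all_multipart_subsets := by
  intro lst _ _
  exact ports_eq lst
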